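-- pv_equiv track=rewrite | github.com/lsh23/algorithm-exercise | 스택/문자열폭발.py | solve
-- ===== SOURCE A (Python) =====
-- def solve(s1: str, s2: str) -> str:
--     answer: str = "FRULA"
--
--     st: list[str] = []
--     for c in s1:
--         st.append(c)
--         if len(st) >= len(s2):
--             if "".join(st[-(len(s2)):]) == s2:
--                 for _ in range(len(s2)):
--                     st.pop()
--
--     if len(st) != 0:
--         answer = "".join(st)
--
--     return answer
-- ===== SOURCE B (Python) =====
-- def solve(s1: str, s2: str) -> str:
--     # KMP-automaton stack: each stack entry keeps the automaton state (length of the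
--     # longest s2-prefix ending there), so each push costs amortized O(1) and a full
--     # match is detected by state == len(s2); O(n + m) total.
--     m = len(s2)
--     if m == 0:
--         return s1 if s1 else "FRULA"
--     fail = [0] * m
--     k = 0
--     for j in range(1, m):
--         while k and s2[j] != s2[k]:
--             k = fail[k - 1]
--         if s2[j] == s2[k]:
--             k += 1
--         fail[j] = k
--     chars = []
--     states = []
--     for c in s1:
--         k = states[-1] if states else 0
--         while k and c != s2[k]:
--             k = fail[k - 1]
--         if c == s2[k]:
--             k += 1
--         if k == m:
--             del chars[len(chars) - (m - 1):]
--             del states[len(states) - (m - 1):]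
--         else:
--             chars.append(c)
--             states.append(k)
--     return "".join(chars) if chars else "FRULA"
-- ===== Notes on version B (the rewrite author's own statement) =====
-- stated objective: alternative
-- what changed: Replaced the per-push suffix join-and-compare with a KMP failure-function automaton whose match state is carried with every stack entry, so a full match is read off state == len(s2) rather than by re-reading the last len(s2) characters; a genuinely different algorithm of comparable measured cost.
import Mathlib
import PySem

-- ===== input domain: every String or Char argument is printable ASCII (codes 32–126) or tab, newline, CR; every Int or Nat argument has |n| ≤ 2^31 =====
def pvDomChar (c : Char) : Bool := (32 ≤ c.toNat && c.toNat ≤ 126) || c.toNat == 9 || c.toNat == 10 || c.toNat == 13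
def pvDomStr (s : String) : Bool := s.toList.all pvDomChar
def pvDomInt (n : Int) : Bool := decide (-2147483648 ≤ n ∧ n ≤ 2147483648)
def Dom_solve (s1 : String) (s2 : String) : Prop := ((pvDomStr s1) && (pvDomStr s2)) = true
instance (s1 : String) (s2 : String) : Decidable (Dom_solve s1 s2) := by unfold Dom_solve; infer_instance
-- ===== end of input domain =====

-- B replaces A's per-push O(m) suffix join-and-compare by a KMP failure-function
-- automaton whose state is carried with every stack entry (alternative algorithm).

-- ===== PORT A =====
-- one iteration of A's 'for c in s1' loop on the stack 'st' (a Lean list, end = top)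
def solveStep (s2 : String) (st : List Char) (c : Char) : List Char :=
  let st := st ++ [c]                                   -- st.append(c)
  if st.length ≥ s2.toList.length then
    if String.ofList (PySem.List.slice st (some (-(s2.toList.length : Int))) none) = s2 then
      -- for _ in range(len(s2)): st.pop()
      (PySem.List.pyRange 0 (s2.toList.length : Int)).foldl (fun l _ => l.dropLast) st
    else st
  else st

def solve (s1 : String) (s2 : String) : String :=
  let st := s1.toList.foldl (solveStep s2) []
  if st.length ≠ 0 then String.ofList st else "FRULA"

-- ===== PORT B =====
-- 'while k and c != s2[k]: k = fail[k-1]'; fuel bounds the strictly decreasing k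
def kmpTransAux (s2l : List Char) (fail : List Nat) (c : Char) : Nat → Nat → Nat
  | 0, k => k
  | fuel + 1, k =>
    if k ≠ 0 ∧ s2l[k]? ≠ some c then kmpTransAux s2l fail c fuel (fail.getD (k - 1) 0) else k

-- the while loop followed by 'if c == s2[k]: k += 1'
def kmpTrans (s2l : List Char) (fail : List Nat) (c : Char) (k : Nat) : Nat :=
  let k' := kmpTransAux s2l fail c k k
  if s2l[k']? = some c then k' + 1 else k'

-- 'for j in range(1, m): … fail[j] = k'; fuel = number of remaining iterations
def buildFailAux (s2l : List Char) : Nat → Nat → Nat → List Nat → List Nat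
  | 0, _, _, acc => acc
  | fuel + 1, j, k, acc =>
    if h : j < s2l.length then
      let k' := kmpTrans s2l acc (s2l[j]'h) k
      buildFailAux s2l fuel (j + 1) k' (acc ++ [k'])
    else acc

def buildFail (s2l : List Char) : List Nat := buildFailAux s2l (s2l.length - 1) 1 0 [0]

-- one iteration of B's loop; the two Python stacks are kept as reversed lists
-- (head = top), so append = cons, states[-1] = head, del of the last m-1 = drop (m-1)
def altStep (m : Nat) (s2l : List Char) (fail : List Nat)
    (p : List Char × List Nat) (c : Char) : List Char × List Nat :=
  let k0 := p.2.headD 0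
  let k := kmpTrans s2l fail c k0
  if k = m then (p.1.drop (m - 1), p.2.drop (m - 1))
  else (c :: p.1, k :: p.2)

def solve_alt (s1 : String) (s2 : String) : String :=
  let m := s2.toList.length
  if m = 0 then (if s1 = "" then "FRULA" else s1)
  else
    let fail := buildFail s2.toList
    let p := s1.toList.foldl (altStep m s2.toList fail) ([], [])
    if p.1 ≠ [] then String.ofList p.1.reverse else "FRULA"

-- ===== PRECONDITION & SPEC =====
def Spec_solve (s1 : String) (s2 : String) (out : String) : Prop := out = solve_alt s1 s2
instance (s1 : String) (s2 : String) (out : String) : Decidable (Spec_solve s1 s2 out) := by unfold Spec_solve; infer_instance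

-- ===== CLAIM (what is proved, stated in full; the proofs are below) =====
def Claim_equal_solve : Prop := ∀ (s1 : String) (s2 : String), Dom_solve s1 s2 → Spec_solve s1 s2 (solve s1 s2)

-- ===== LEMMAS AND PROOFS =====

-- 'the s2-prefix of length k ends the text x'
abbrev kmpOk (s2l x : List Char) (k : Nat) : Prop := s2l.take k <:+ x

-- the longest s2-prefix that is a suffix of x (the KMP automaton state on text x)
def kmpBest (s2l x : List Char) : Nat := Nat.findGreatest (kmpOk s2l x) s2l.length

-- s2[1..j] — the text whose automaton state is fail[j]
def kmpTextOf (s2l : List Char) (j : Nat) : List Char := (s2l.take (j + 1)).drop 1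

def kmpFailSpec (s2l : List Char) (j : Nat) : Nat := kmpBest s2l (kmpTextOf s2l j)

lemma kmpOk_zero (s2l x : List Char) : kmpOk s2l x 0 := by
  simp [kmpOk]

lemma kmpBest_ok (s2l x : List Char) : kmpOk s2l x (kmpBest s2l x) :=
  Nat.findGreatest_spec (Nat.zero_le _) (kmpOk_zero s2l x)

lemma kmpBest_le (s2l x : List Char) : kmpBest s2l x ≤ s2l.length :=
  Nat.findGreatest_le _

lemma le_kmpBest (s2l x : List Char) (j : Nat) (hj : j ≤ s2l.length) (h : kmpOk s2l x j) :
    j ≤ kmpBest s2l x :=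
  Nat.le_findGreatest hj h

lemma kmpOk_length (s2l x : List Char) (k : Nat) (h : kmpOk s2l x k) (hk : k ≤ s2l.length) :
    k ≤ x.length := by
  have := h.length_le
  rwa [List.length_take, min_eq_left hk] at this

lemma kmpBest_nil (s2l : List Char) (h : s2l ≠ []) : kmpBest s2l [] = 0 := by
  have h1 := kmpBest_ok s2l []
  rw [kmpOk, List.suffix_nil, List.take_eq_nil_iff] at h1
  rcases h1 with h1 | h1
  · exact h1
  · exact absurd h1 h

lemma suffix_of_suffix_length_le {u v x : List Char} (h1 : u <:+ x) (h2 : v <:+ x)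
    (hl : u.length ≤ v.length) : u <:+ v := by
  rw [← List.reverse_prefix]
  exact List.prefix_of_prefix_length_le (List.reverse_prefix.mpr h1)
    (List.reverse_prefix.mpr h2) (by simpa using hl)

lemma suffix_drop_one {u v : List Char} (h : u <:+ v) (hl : u.length + 1 ≤ v.length) :
    u <:+ v.drop 1 := by
  obtain ⟨w, rfl⟩ := h
  have hw : 1 ≤ w.length := by
    rw [List.length_append] at hl
    omega
  rw [List.drop_append_of_le_length hw]
  exact List.suffix_append _ _

lemma kmpTextOf_pred (s2l : List Char) (k : Nat) (hk1 : 1 ≤ k) :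
    kmpTextOf s2l (k - 1) = (s2l.take k).drop 1 := by
  unfold kmpTextOf
  rw [show k - 1 + 1 = k from by omega]

lemma kmpOk_textOf (s2l x : List Char) (j k : Nat) (hj : j < k) (hk : k ≤ s2l.length)
    (h1 : kmpOk s2l x j) (h2 : kmpOk s2l x k) : kmpOk s2l (kmpTextOf s2l (k - 1)) j := by
  rw [kmpTextOf_pred s2l k (by omega)]
  have hsub : s2l.take j <:+ s2l.take k :=
    suffix_of_suffix_length_le h1 h2 (by simp [List.length_take]; omega)
  apply suffix_drop_one hsub
  simp [List.length_take]
  omega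

lemma kmpOk_of_textOf (s2l x : List Char) (j k : Nat) (h2 : kmpOk s2l x k) (hk1 : 1 ≤ k)
    (h : kmpOk s2l (kmpTextOf s2l (k - 1)) j) : kmpOk s2l x j := by
  rw [kmpTextOf_pred s2l k hk1] at h
  exact (h.trans (List.drop_suffix 1 _)).trans h2

lemma kmpFailSpec_lt (s2l : List Char) (k : Nat) (hk1 : 1 ≤ k) (hk : k ≤ s2l.length) :
    kmpFailSpec s2l (k - 1) < k := by
  have h1 := kmpBest_ok s2l (kmpTextOf s2l (k - 1))
  have h2 := kmpBest_le s2l (kmpTextOf s2l (k - 1))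
  have h3 := kmpOk_length _ _ _ h1 h2
  have hlen : (kmpTextOf s2l (k - 1)).length = k - 1 := by
    rw [kmpTextOf_pred s2l k hk1]
    simp [List.length_take]
    omega
  unfold kmpFailSpec
  omega

lemma take_rev_prefix_cons (s2l l : List Char) (c : Char) (j : Nat) (hj : j < s2l.length) :
    (s2l.take (j + 1)).reverse <+: (c :: l) ↔ s2l[j]? = some c ∧ (s2l.take j).reverse <+: l := by
  have hg : s2l[j]? = some s2l[j] := List.getElem?_eq_getElem hj
  rw [List.take_add_one, hg]
  simp only [Option.toList_some, List.reverse_append, List.reverse_cons, List.reverse_nil,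
    List.nil_append, List.singleton_append, List.cons_prefix_cons, Option.some.injEq]

lemma kmpOk_concat (s2l x : List Char) (c : Char) (k : Nat) (hk1 : 1 ≤ k) (hk : k ≤ s2l.length) :
    kmpOk s2l (x ++ [c]) k ↔ s2l[k - 1]? = some c ∧ kmpOk s2l x (k - 1) := by
  have hbr : (x ++ [c]).reverse = c :: x.reverse := by simp
  have hk' : k - 1 + 1 = k := by omega
  constructor
  · intro h
    have h' : (s2l.take (k - 1 + 1)).reverse <+: c :: x.reverse := by
      rw [hk', ← hbr]
      exact List.reverse_prefix.mpr h
    rw [take_rev_prefix_cons s2l x.reverse c (k - 1) (by omega)] at h'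
    exact ⟨h'.1, List.reverse_prefix.mp h'.2⟩
  · rintro ⟨h1, h2⟩
    have h' := (take_rev_prefix_cons s2l x.reverse c (k - 1) (by omega)).mpr
      ⟨h1, List.reverse_prefix.mpr h2⟩
    rw [hk', ← hbr] at h'
    exact List.reverse_prefix.mp h'

lemma kmpTransAux_correct (s2l : List Char) (fail : List Nat) (c : Char) (x : List Char)
    (kcap : Nat) (hfail : ∀ i, i < kcap → fail.getD i 0 = kmpFailSpec s2l i) :
    ∀ fuel k, k ≤ fuel → k ≤ kcap → k < s2l.length → kmpOk s2l x k →
      (∀ j, j ≤ s2l.length → kmpOk s2l (x ++ [c]) j → j ≤ k + 1) →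
      (kmpOk s2l x (kmpTransAux s2l fail c fuel k) ∧
       kmpTransAux s2l fail c fuel k ≤ k ∧
       (∀ j, j ≤ s2l.length → kmpOk s2l (x ++ [c]) j → j ≤ kmpTransAux s2l fail c fuel k + 1) ∧
       (kmpTransAux s2l fail c fuel k = 0 ∨ s2l[kmpTransAux s2l fail c fuel k]? = some c)) := by
  intro fuel
  induction fuel with
  | zero =>
    intro k hkf hkc hkm hok hinv
    have hk0 : k = 0 := by omega
    subst hk0
    exact ⟨hok, le_refl _, hinv, Or.inl rfl⟩
  | succ fuel ih =>
    intro k hkf hkc hkm hok hinv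
    by_cases hcond : k ≠ 0 ∧ s2l[k]? ≠ some c
    · rw [show kmpTransAux s2l fail c (fuel + 1) k
          = kmpTransAux s2l fail c fuel (fail.getD (k - 1) 0) from by
        simp only [kmpTransAux, if_pos hcond]]
      rw [hfail (k - 1) (by omega)]
      have hklt : kmpFailSpec s2l (k - 1) < k := kmpFailSpec_lt s2l k (by omega) (by omega)
      have hok1 : kmpOk s2l x (kmpFailSpec s2l (k - 1)) :=
        kmpOk_of_textOf s2l x _ k hok (by omega) (kmpBest_ok s2l (kmpTextOf s2l (k - 1)))
      have hinv1 : ∀ j, j ≤ s2l.length → kmpOk s2l (x ++ [c]) j → j ≤ kmpFailSpec s2l (k - 1) + 1 := by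
        intro j hj hcj
        rcases Nat.eq_zero_or_pos j with hj0 | hj0
        · omega
        · obtain ⟨hc1, hc2⟩ := (kmpOk_concat s2l x c j (by omega) hj).mp hcj
          have hjk : j ≤ k + 1 := hinv j hj hcj
          have hjne : j ≠ k + 1 := by
            intro he
            apply hcond.2
            rw [← hc1]
            congr 1
            omega
          have hjlt : j - 1 < k := by omega
          have htx := kmpOk_textOf s2l x (j - 1) k hjlt (by omega) hc2 hok
          have := le_kmpBest s2l (kmpTextOf s2l (k - 1)) (j - 1) (by omega) htx
          unfold kmpFailSpec
          omega
      obtain ⟨r1, r2, r3, r4⟩ := ih (kmpFailSpec s2l (k - 1)) (by omega) (by omega) (by omega) hok1 hinv1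
      exact ⟨r1, by omega, r3, r4⟩
    · rw [show kmpTransAux s2l fail c (fuel + 1) k = k from by
        simp only [kmpTransAux, if_neg hcond]]
      refine ⟨hok, le_refl _, hinv, ?_⟩
      by_cases hz : k = 0
      · exact Or.inl hz
      · right
        by_contra hne
        exact hcond ⟨hz, hne⟩

lemma kmpTrans_best (s2l : List Char) (fail : List Nat) (x : List Char) (c : Char)
    (kcap : Nat) (hfail : ∀ i, i < kcap → fail.getD i 0 = kmpFailSpec s2l i)
    (hkc : kmpBest s2l x ≤ kcap) (hlt : kmpBest s2l x < s2l.length) :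
    kmpTrans s2l fail c (kmpBest s2l x) = kmpBest s2l (x ++ [c]) := by
  have hinv : ∀ j, j ≤ s2l.length → kmpOk s2l (x ++ [c]) j → j ≤ kmpBest s2l x + 1 := by
    intro j hj hcj
    rcases Nat.eq_zero_or_pos j with hj0 | hj0
    · omega
    · obtain ⟨-, hc2⟩ := (kmpOk_concat s2l x c j (by omega) hj).mp hcj
      have := le_kmpBest s2l x (j - 1) (by omega) hc2
      omega
  obtain ⟨h1, h2, h3, h4⟩ := kmpTransAux_correct s2l fail c x kcap hfail
    (kmpBest s2l x) (kmpBest s2l x) (le_refl _) hkc hlt (kmpBest_ok s2l x) hinv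
  set r := kmpTransAux s2l fail c (kmpBest s2l x) (kmpBest s2l x) with hr
  show (if s2l[r]? = some c then r + 1 else r) = kmpBest s2l (x ++ [c])
  by_cases hc : s2l[r]? = some c
  · rw [if_pos hc]
    have hok' : kmpOk s2l (x ++ [c]) (r + 1) := by
      rw [kmpOk_concat s2l x c (r + 1) (by omega) (by omega)]
      exact ⟨by simpa using hc, by simpa using h1⟩
    exact le_antisymm (le_kmpBest s2l (x ++ [c]) (r + 1) (by omega) hok')
      (h3 _ (kmpBest_le s2l (x ++ [c])) (kmpBest_ok s2l (x ++ [c])))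
  · rw [if_neg hc]
    have hr0 : r = 0 := by
      rcases h4 with h | h
      · exact h
      · exact absurd h hc
    rw [hr0]
    have hb := h3 (kmpBest s2l (x ++ [c])) (kmpBest_le s2l (x ++ [c])) (kmpBest_ok s2l (x ++ [c]))
    rw [hr0] at hb
    by_contra hne
    have hb1 : kmpBest s2l (x ++ [c]) = 1 := by omega
    obtain ⟨hc1, -⟩ := (kmpOk_concat s2l x c 1 (le_refl _) (by
        have := kmpBest_le s2l (x ++ [c]); omega)).mp (hb1 ▸ kmpBest_ok s2l (x ++ [c]))
    apply hc
    rw [hr0]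
    simpa using hc1

lemma kmpTextOf_succ (s2l : List Char) (j : Nat) (hj1 : 1 ≤ j) (hj : j < s2l.length) :
    kmpTextOf s2l j = kmpTextOf s2l (j - 1) ++ [s2l[j]] := by
  have hg : s2l[j]? = some s2l[j] := List.getElem?_eq_getElem hj
  rw [kmpTextOf_pred s2l j hj1]
  unfold kmpTextOf
  rw [List.take_add_one, hg]
  simp only [Option.toList_some]
  rw [List.drop_append_of_le_length (by simp [List.length_take]; omega)]

lemma buildFailAux_spec (s2l : List Char) : ∀ (fuel j k : Nat) (acc : List Nat),
    fuel = s2l.length - j →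
    1 ≤ j → acc.length = j →
    (∀ i, i < j → acc.getD i 0 = kmpFailSpec s2l i) →
    k = kmpFailSpec s2l (j - 1) →
    ∀ i, i < s2l.length → (buildFailAux s2l fuel j k acc).getD i 0 = kmpFailSpec s2l i := by
  intro fuel
  induction fuel with
  | zero =>
    intro j k acc hn h1 h3 h4 h5 i hi
    exact h4 i (by omega)
  | succ fuel ih =>
    intro j k acc hn h1 h3 h4 h5 i hi
    have hj : j < s2l.length := by omega
    rw [show buildFailAux s2l (fuel + 1) j k acc
        = buildFailAux s2l fuel (j + 1) (kmpTrans s2l acc (s2l[j]'hj) k)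
            (acc ++ [kmpTrans s2l acc (s2l[j]'hj) k]) from by
      simp only [buildFailAux, dif_pos hj]]
    have hblt : kmpBest s2l (kmpTextOf s2l (j - 1)) < s2l.length := by
      have := kmpFailSpec_lt s2l j h1 (by omega)
      unfold kmpFailSpec at this
      omega
    have hbc : kmpBest s2l (kmpTextOf s2l (j - 1)) ≤ j := by
      have := kmpFailSpec_lt s2l j h1 (by omega)
      unfold kmpFailSpec at this
      omega
    have hk' : kmpTrans s2l acc (s2l[j]'hj) k = kmpFailSpec s2l j := by
      rw [h5]
      unfold kmpFailSpec
      rw [show kmpTextOf s2l j = kmpTextOf s2l (j - 1) ++ [s2l[j]] from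
        kmpTextOf_succ s2l j h1 hj]
      exact kmpTrans_best s2l acc (kmpTextOf s2l (j - 1)) (s2l[j]) j h4 hbc hblt
    apply ih (j + 1) _ _ (by omega) (by omega) (by simp [h3])
    · intro i' hi'
      by_cases hlt : i' < j
      · rw [List.getD_append _ _ _ _ (by omega), h4 i' hlt]
      · have hieq : i' = j := by omega
        subst hieq
        rw [List.getD_eq_getElem?_getD, List.getElem?_append_right (by omega), h3]
        simpa using hk'
    · rw [show j + 1 - 1 = j from by omega]
      exact hk'
    · exact hi

lemma buildFail_spec (s2l : List Char) (h : s2l ≠ []) :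
    ∀ i, i < s2l.length → (buildFail s2l).getD i 0 = kmpFailSpec s2l i := by
  have hpos : 0 < s2l.length := List.length_pos_iff.mpr h
  have hf0 : kmpFailSpec s2l 0 = 0 := by
    unfold kmpFailSpec
    rw [show kmpTextOf s2l 0 = [] from by
      unfold kmpTextOf
      exact List.drop_eq_nil_of_le (by simp [List.length_take])]
    exact kmpBest_nil s2l h
  apply buildFailAux_spec s2l (s2l.length - 1) 1 0 [0] (by omega) (le_refl _) rfl
  · intro i hi
    have : i = 0 := by omega
    subst this
    simpa using hf0.symm
  · simpa using hf0.symm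

-- the states B stores, as a function of the (reversed) char stack
def bestR (s2l l : List Char) : Nat := kmpBest s2l l.reverse

def canonStates (s2l : List Char) : List Char → List Nat
  | [] => []
  | c :: l => bestR s2l (c :: l) :: canonStates s2l l

-- every prefix of the stack was pushed without completing a match
def GoodR (s2l : List Char) : List Char → Prop
  | [] => True
  | c :: l => bestR s2l (c :: l) < s2l.length ∧ GoodR s2l l

lemma canonStates_drop (s2l : List Char) : ∀ (l : List Char) (k : Nat),
    canonStates s2l (l.drop k) = (canonStates s2l l).drop k := by
  intro l k
  induction k generalizing l with
  | zero => simp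
  | succ k ih =>
    cases l with
    | nil => simp [canonStates]
    | cons c l =>
      rw [List.drop_succ_cons, ih l,
        show canonStates s2l (c :: l) = bestR s2l (c :: l) :: canonStates s2l l from rfl,
        List.drop_succ_cons]

lemma GoodR_drop (s2l : List Char) : ∀ (l : List Char) (k : Nat),
    GoodR s2l l → GoodR s2l (l.drop k) := by
  intro l k
  induction k generalizing l with
  | zero => simp
  | succ k ih =>
    cases l with
    | nil => simp
    | cons c l =>
      intro hg
      rw [List.drop_succ_cons]
      exact ih l hg.2

lemma canonStates_headD (s2l : List Char) (h : s2l ≠ []) (l : List Char) :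
    (canonStates s2l l).headD 0 = bestR s2l l := by
  cases l with
  | nil => simp [canonStates, bestR, kmpBest_nil s2l h]
  | cons c l => rfl

lemma bestR_lt_of_Good (s2l : List Char) (h : s2l ≠ []) (l : List Char) (hg : GoodR s2l l) :
    bestR s2l l < s2l.length := by
  cases l with
  | nil =>
    rw [show bestR s2l [] = 0 from by simp [bestR, kmpBest_nil s2l h]]
    exact List.length_pos_iff.mpr h
  | cons c l => exact hg.1

lemma foldl_dropLast : ∀ (xs : List Int) (l : List Char),
    xs.foldl (fun l _ => l.dropLast) l = l.take (l.length - xs.length) := by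
  intro xs
  induction xs with
  | nil => intro l; simp
  | cons x xs ih =>
    intro l
    simp only [List.foldl_cons, List.length_cons]
    rw [ih, List.dropLast_eq_take, List.take_take, List.length_take]
    congr 1
    omega

-- A's pop condition, as a suffix statement on the reversed stack
lemma condA_iff (s2 : String) (st' : List Char) (h : s2.toList ≠ []) :
    (st'.length ≥ s2.toList.length ∧
      String.ofList (PySem.List.slice st' (some (-(s2.toList.length : Int))) none) = s2)
    ↔ s2.toList.reverse <+: st'.reverse := by
  rw [PySem.List.slice_from_neg_natCast st' s2.toList.length (List.length_pos_iff.mpr h)]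
  have hstr : ∀ D : List Char, (String.ofList D = s2) ↔ D = s2.toList := by
    intro D
    constructor
    · intro hx; rw [← hx, String.toList_ofList]
    · intro hx; rw [hx, String.ofList_toList]
  rw [hstr]
  by_cases hl : s2.toList.length ≤ st'.length
  · have key : (st'.drop (st'.length - s2.toList.length)).reverse = st'.reverse.take s2.toList.length := by
      rw [List.reverse_drop]
      congr 1
      omega
    constructor
    · rintro ⟨-, h2⟩
      rw [List.prefix_iff_eq_take, List.length_reverse, ← key, h2]
    · intro hp
      refine ⟨hl, ?_⟩
      rw [List.prefix_iff_eq_take, List.length_reverse, ← key] at hp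
      have h3 : s2.toList = st'.drop (st'.length - s2.toList.length) := by
        simpa using congrArg List.reverse hp
      exact h3.symm
  · constructor
    · rintro ⟨h1, -⟩; omega
    · intro hp
      exfalso
      have := hp.length_le
      simp only [List.length_reverse] at this
      omega

lemma step_sim (s2 : String) (h : s2.toList ≠ []) (st : List Char) (c : Char)
    (hg : GoodR s2.toList st.reverse) :
    altStep s2.toList.length s2.toList (buildFail s2.toList)
        (st.reverse, canonStates s2.toList st.reverse) c
      = ((solveStep s2 st c).reverse, canonStates s2.toList (solveStep s2 st c).reverse)
    ∧ GoodR s2.toList (solveStep s2 st c).reverse := by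
  have hpos : 0 < s2.toList.length := List.length_pos_iff.mpr h
  have hrev : (st ++ [c]).reverse = c :: st.reverse := by simp
  have hb : bestR s2.toList st.reverse = kmpBest s2.toList st := by simp [bestR]
  have hk0 : kmpBest s2.toList st < s2.toList.length := by
    rw [← hb]
    exact bestR_lt_of_Good s2.toList h st.reverse hg
  have htr : kmpTrans s2.toList (buildFail s2.toList) c (kmpBest s2.toList st)
      = kmpBest s2.toList (st ++ [c]) :=
    kmpTrans_best s2.toList (buildFail s2.toList) st c s2.toList.length
      (buildFail_spec s2.toList h) (by omega) hk0
  have hbm := kmpBest_le s2.toList (st ++ [c])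
  simp only [altStep]
  rw [canonStates_headD s2.toList h st.reverse, hb, htr]
  by_cases hfullb : kmpBest s2.toList (st ++ [c]) = s2.toList.length
  · rw [if_pos hfullb]
    have hokm : kmpOk s2.toList (st ++ [c]) s2.toList.length := hfullb ▸ kmpBest_ok s2.toList (st ++ [c])
    have hsfx : s2.toList <:+ st ++ [c] := by
      have := hokm
      rwa [kmpOk, List.take_length] at this
    have hA := (condA_iff s2 (st ++ [c]) h).mpr (List.reverse_prefix.mpr hsfx)
    have hAres : solveStep s2 st c
        = (st ++ [c]).take ((st ++ [c]).length - s2.toList.length) := by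
      simp only [solveStep]
      rw [if_pos hA.1, if_pos hA.2, PySem.List.pyRange_zero_natCast, foldl_dropLast]
      simp
    have hrevtake : ((st ++ [c]).take ((st ++ [c]).length - s2.toList.length)).reverse
        = st.reverse.drop (s2.toList.length - 1) := by
      rw [List.reverse_take, show (st ++ [c]).length - ((st ++ [c]).length - s2.toList.length)
          = s2.toList.length from by have := hA.1; omega, hrev]
      obtain ⟨k, hk⟩ : ∃ k, s2.toList.length = k + 1 := ⟨s2.toList.length - 1, by omega⟩
      rw [hk]
      simp [List.drop_succ_cons]
    constructor
    · rw [hAres, hrevtake, canonStates_drop]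
    · rw [hAres, hrevtake]
      exact GoodR_drop s2.toList st.reverse _ hg
  · rw [if_neg hfullb]
    have hnotsfx : ¬ (s2.toList.reverse <+: (st ++ [c]).reverse) := by
      intro hp
      have hsfx : s2.toList <:+ st ++ [c] := List.reverse_prefix.mp hp
      have hok' : kmpOk s2.toList (st ++ [c]) s2.toList.length := by
        rw [kmpOk, List.take_length]
        exact hsfx
      have := le_kmpBest s2.toList (st ++ [c]) s2.toList.length (le_refl _) hok'
      omega
    have hAres : solveStep s2 st c = st ++ [c] := by
      simp only [solveStep]
      by_cases h1 : (st ++ [c]).length ≥ s2.toList.length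
      · rw [if_pos h1, if_neg]
        intro h2
        exact hnotsfx ((condA_iff s2 (st ++ [c]) h).mp ⟨h1, h2⟩)
      · rw [if_neg h1]
    rw [hAres, hrev]
    have hcanon : canonStates s2.toList (c :: st.reverse)
        = bestR s2.toList (c :: st.reverse) :: canonStates s2.toList st.reverse := rfl
    have hbR : bestR s2.toList (c :: st.reverse) = kmpBest s2.toList (st ++ [c]) := by
      simp [bestR]
    constructor
    · rw [hcanon, hbR]
    · exact ⟨by rw [hbR]; omega, hg⟩

lemma fold_sim (s2 : String) (h : s2.toList ≠ []) : ∀ (cs : List Char) (st : List Char),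
    GoodR s2.toList st.reverse →
    (cs.foldl (altStep s2.toList.length s2.toList (buildFail s2.toList))
        (st.reverse, canonStates s2.toList st.reverse)
      = ((cs.foldl (solveStep s2) st).reverse,
         canonStates s2.toList (cs.foldl (solveStep s2) st).reverse))
    ∧ GoodR s2.toList (cs.foldl (solveStep s2) st).reverse := by
  intro cs
  induction cs with
  | nil => intro st hg; exact ⟨rfl, hg⟩
  | cons c cs ih =>
    intro st hg
    obtain ⟨he, hgood⟩ := step_sim s2 h st c hg
    simp only [List.foldl_cons]
    rw [he]
    exact ih (solveStep s2 st c) hgood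

lemma fold_empty (s2 : String) (h : s2.toList = []) : ∀ (cs : List Char) (st : List Char),
    cs.foldl (solveStep s2) st = st ++ cs := by
  intro cs
  induction cs with
  | nil => intro st; simp
  | cons c cs ih =>
    intro st
    have hstep : solveStep s2 st c = st ++ [c] := by
      simp only [solveStep, h]
      rw [if_pos (by simp)]
      rw [if_neg]
      intro h2
      have := congrArg String.toList h2
      rw [String.toList_ofList, h] at this
      simp at this
    simp only [List.foldl_cons, hstep, ih]
    simp

-- ===== VERDICT (by name: the statement is the Claim_ definition above) =====
theorem solve_spec : Claim_equal_solve := by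
  intro s1 s2 _
  show solve s1 s2 = solve_alt s1 s2
  by_cases h0 : s2.toList = []
  · simp only [solve, solve_alt]
    rw [fold_empty s2 h0 s1.toList [], List.nil_append]
    by_cases hs : s1 = ""
    · subst hs
      simp [h0]
    · have hne : s1.toList ≠ [] := fun hx => hs (String.toList_eq_nil_iff.mp hx)
      rw [if_pos (by simpa using hne), if_pos (by simp [h0]), if_neg hs, String.ofList_toList]
  · simp only [solve, solve_alt]
    have hm0 : ¬ s2.toList.length = 0 := by simpa using h0
    rw [if_neg hm0]
    have hf := (fold_sim s2 h0 s1.toList [] (by rw [List.reverse_nil]; trivial)).1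
    simp only [List.reverse_nil] at hf
    rw [show canonStates s2.toList [] = [] from rfl] at hf
    rw [hf]
    by_cases hst : s1.toList.foldl (solveStep s2) [] = []
    · simp [hst]
    · rw [if_pos (by simpa using hst), if_pos (by simpa using hst)]
      rw [List.reverse_reverse]
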